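-- pv_equiv track=rewrite | github.com/chen21439/layoutlmft | examples/comp_hrdoc/utils/tree_utils.py | format_tree_from_parents
-- ===== SOURCE A (Python) =====
-- from typing import List, Dict, Tuple, Optional, Any, Union
--
-- def format_tree_from_parents(
--     parents: List[int],
--     texts: List[str],
--     mask: Optional[List[bool]] = None,
--     max_text_len: int = 40,
-- ) -> List[str]:
--     """从 parent 列表构建树形可视化字符串
--
--     复用自 train_doc.py 的 build_tree_str 逻辑。
--     注意：parents 的值应该是 0-based 索引，不是原始 line_id。
--
--     Args:
--         parents: 父节点索引列表，自指向(parent==self)表示 root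
--         texts: 节点文本列表
--         mask: 可选的掩码，True 表示包含该节点
--         max_text_len: 文本最大显示长度
--
--     Returns:
--         树形字符串列表
--
--     Example:
--         ├── [0] 第一章 总则
--           ├── [1] 一、适用范围
--           ├── [2] 二、定义
--         ├── [3] 第二章 招标内容
--     """
--     n = len(parents)
--     children = {i: [] for i in range(-1, n)}
--
--     for i, p in enumerate(parents):
--         if mask is None or mask[i]:
--             # 自指向方案：parent == self 表示 root，映射到 -1
--             if p == i:
--                 children[-1].append(i)
--             else:
--                 children[p].append(i)
--
--     def _format(node_idx, indent=0):
--         result = []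
--         for child in children.get(node_idx, []):
--             text = texts[child] if child < len(texts) else f"[{child}]"
--             if len(text) > max_text_len:
--                 text = text[:max_text_len - 3] + "..."
--             result.append("  " * indent + f"├── [{child}] {text}")
--             result.extend(_format(child, indent + 1))
--         return result
--
--     return _format(-1)  # 从 root (-1) 开始
-- ===== SOURCE B (Python) =====
-- from typing import List, Optional
--
--
-- def format_tree_from_parents(
--     parents: List[int],
--     texts: List[str],
--     mask: Optional[List[bool]] = None,
--     max_text_len: int = 40,
-- ) -> List[str]:
--     n = len(parents)
--     children = {i: [] for i in range(-1, n)}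
--
--     for i, p in enumerate(parents):
--         if mask is None or mask[i]:
--             if p == i:
--                 children[-1].append(i)
--             else:
--                 children[p].append(i)
--
--     # Iterative pre-order DFS with an explicit (node, indent) stack instead of
--     # recursion: children are pushed in reverse so they pop left-to-right.
--     lines = []
--     stack = [(c, 0) for c in reversed(children[-1])]
--     while stack:
--         child, indent = stack.pop()
--         text = texts[child] if child < len(texts) else f"[{child}]"
--         if len(text) > max_text_len:
--             text = text[: max_text_len - 3] + "..."
--         lines.append("  " * indent + f"├── [{child}] {text}")
--         stack.extend((c, indent + 1) for c in reversed(children[child]))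
--     return lines
-- ===== Notes on version B (the rewrite author's own statement) =====
-- stated objective: alternative
-- what changed: The recursive _format helper is replaced by an iterative pre-order DFS with an explicit (node, indent) stack (children pushed in reverse, line emitted at pop); the adjacency-dict phase is unchanged.
import Mathlib
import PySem

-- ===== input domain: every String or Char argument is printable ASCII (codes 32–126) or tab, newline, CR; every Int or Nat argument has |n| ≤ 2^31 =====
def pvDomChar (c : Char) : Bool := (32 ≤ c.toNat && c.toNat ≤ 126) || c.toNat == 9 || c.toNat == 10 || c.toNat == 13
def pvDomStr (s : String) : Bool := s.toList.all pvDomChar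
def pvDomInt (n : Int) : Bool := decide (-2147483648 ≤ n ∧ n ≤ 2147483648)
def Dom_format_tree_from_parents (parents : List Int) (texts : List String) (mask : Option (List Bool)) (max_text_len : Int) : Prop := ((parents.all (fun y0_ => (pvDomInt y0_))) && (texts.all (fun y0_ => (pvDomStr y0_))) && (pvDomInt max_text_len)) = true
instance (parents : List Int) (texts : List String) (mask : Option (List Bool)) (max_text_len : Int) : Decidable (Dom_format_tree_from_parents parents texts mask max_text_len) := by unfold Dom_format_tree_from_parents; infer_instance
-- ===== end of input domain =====

-- B replaces A's recursive `_format` helper by an iterative pre-order DFS over an explicit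
-- (node, indent) stack; the adjacency-dict phase and all line formatting are unchanged
-- (objective: alternative decomposition, no speed claim).

-- ===== PORT A =====

-- `mask is None or mask[i]` — `mask[i]` raises IndexError when i ≥ len(mask); that is excluded
-- by Pre_format_tree_from_parents, inside which the pyGetD default is never read.
def pvIncl (mask : Option (List Bool)) (i : Int) : Bool :=
  match mask with
  | none => true
  | some m => PySem.List.pyGetD m i false

-- Phase 1 (textually identical in A and in B): children = {i: [] for i in range(-1, n)}, then
-- children[-1].append(i) / children[p].append(i) for each included i.  `children[p].append(i)`
-- raises KeyError when p is not a key; Pre_format_tree_from_parents excludes that, and inside it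
-- Dict.modify's [] default is never read (every touched key is present with value a list).
def pvChildren (parents : List Int) (mask : Option (List Bool)) : PySem.Dict Int (List Int) :=
  (PySem.List.enumerate parents).foldl (fun d q =>
    if pvIncl mask q.1 then
      if q.2 == q.1 then d.modify (-1) [] (· ++ [q.1]) else d.modify q.2 [] (· ++ [q.1])
    else d)
    -- init = the dict comprehension {i: [] for i in range(-1, n)}
    ((PySem.List.pyRange (-1) (parents.length : Int) 1).foldl (fun d i => d.insert i []) PySem.Dict.empty)

-- "  " * indent (indent is a non-negative Python int)
def pvSpaces : Nat → String
  | 0 => ""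
  | k + 1 => "  " ++ pvSpaces k

-- The loop body shared verbatim by A's `_format` and B's while-loop: text lookup with the
-- f"[{child}]" fallback (child is always ≥ 0 here, so pyGetD's default is never read),
-- truncation, and "  " * indent + f"├── [{child}] {text}".
def pvLine (texts : List String) (max_text_len : Int) (child : Int) (indent : Nat) : String :=
  let text := if child < (texts.length : Int) then PySem.List.pyGetD texts child ""
              else "[" ++ PySem.Int.toStr child ++ "]"
  let text := if max_text_len < PySem.Str.len text
              then PySem.Str.slice text none (some (max_text_len - 3)) ++ "..." else text
  pvSpaces indent ++ "├── [" ++ PySem.Int.toStr child ++ "] " ++ text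

-- A's recursive `_format`; the fuel (len(parents)+1 at the top call) only makes the recursion
-- structural — it bounds the Python recursion depth, because the traversal's ancestor chains
-- are duplicate-free (proved below, lemma `pvComp_of_chain`).
def pvFormatA (children : PySem.Dict Int (List Int)) (texts : List String) (max_text_len : Int) :
    Nat → Int → Nat → List String
  | 0, _, _ => []
  | fuel + 1, node, indent =>
    (children.getD node []).foldl (fun result child =>
      result ++ [pvLine texts max_text_len child indent]
             ++ pvFormatA children texts max_text_len fuel child (indent + 1)) []

def format_tree_from_parents (parents : List Int) (texts : List String) (mask : Option (List Bool)) (max_text_len : Int) : List String :=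
  pvFormatA (pvChildren parents mask) texts max_text_len (parents.length + 1) (-1) 0

-- ===== PORT B =====

-- B's while-loop. The stack top is the list HEAD here, so Python's pop-from-the-end of a stack
-- extended with reversed(children[child]) is: pop the head, prepend the bucket in order.
-- The fuel (len(parents)+1 at the top call) bounds the number of pops: each pop prints a
-- distinct node (proved below).
def pvLoopB (children : PySem.Dict Int (List Int)) (texts : List String) (max_text_len : Int) :
    Nat → List (Int × Nat) → List String → List String
  | 0, _, lines => lines
  | _ + 1, [], lines => lines
  | fuel + 1, (child, indent) :: rest, lines =>
    pvLoopB children texts max_text_len fuel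
      ((children.getD child []).map (fun c => (c, indent + 1)) ++ rest)
      (lines ++ [pvLine texts max_text_len child indent])

def format_tree_from_parents_alt (parents : List Int) (texts : List String) (mask : Option (List Bool)) (max_text_len : Int) : List String :=
  pvLoopB (pvChildren parents mask) texts max_text_len (parents.length + 1)
    (((pvChildren parents mask).getD (-1) []).map (fun c => (c, 0))) []

-- ===== PRECONDITION & SPEC =====

-- Exactly the inputs where the Python A returns: mask (when given) must cover every index
-- (else IndexError), and every included non-self parent must be a dict key in -1..n-1
-- (else KeyError).
def Pre_format_tree_from_parents (parents : List Int) (texts : List String) (mask : Option (List Bool)) (max_text_len : Int) : Prop :=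
  (mask.all (fun m => decide (parents.length ≤ m.length)) = true) ∧
  ∀ i ∈ List.range parents.length,
    (mask.all (fun m => m.getD i false) = true) →
    (parents.getD i 0 = (i : Int) ∨ (-1 ≤ parents.getD i 0 ∧ parents.getD i 0 < (parents.length : Int)))

instance (parents : List Int) (texts : List String) (mask : Option (List Bool)) (max_text_len : Int) : Decidable (Pre_format_tree_from_parents parents texts mask max_text_len) := by unfold Pre_format_tree_from_parents; infer_instance

def pvWitness_format_tree_from_parents : List Int × List String × Option (List Bool) × Int :=
  ([0, 0, 1], ["chapter one", "section", "subsection"], some [true, true, true], 40)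

def Spec_format_tree_from_parents (parents : List Int) (texts : List String) (mask : Option (List Bool)) (max_text_len : Int) (out : List String) : Prop := out = format_tree_from_parents_alt parents texts mask max_text_len
instance (parents : List Int) (texts : List String) (mask : Option (List Bool)) (max_text_len : Int) (out : List String) : Decidable (Spec_format_tree_from_parents parents texts mask max_text_len out) := by unfold Spec_format_tree_from_parents; infer_instance

-- ===== CLAIM (what is proved, stated in full; the proofs are below) =====
def Claim_equal_format_tree_from_parents : Prop := ∀ (parents : List Int) (texts : List String) (mask : Option (List Bool)) (max_text_len : Int), Dom_format_tree_from_parents parents texts mask max_text_len → Pre_format_tree_from_parents parents texts mask max_text_len → Spec_format_tree_from_parents parents texts mask max_text_len (format_tree_from_parents parents texts mask max_text_len)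

-- ===== LEMMAS AND PROOFS =====

-- The bucket function both traversals read: children.get(c, []) (A) / children[c] (B).
def pvG (parents : List Int) (mask : Option (List Bool)) (c : Int) : List Int :=
  (pvChildren parents mask).getD c []

-- The normalized parent of a node: -1 for self-parent (root) and for anything out of range
-- (-1 is absorbing, which makes ancestor iteration well-behaved).
def pvNp (parents : List Int) (x : Int) : Int :=
  if x < 0 ∨ (parents.length : Int) ≤ x then -1
  else if PySem.List.pyGetD parents x 0 = x then -1 else PySem.List.pyGetD parents x 0

-- x is a node the traversal can print: a valid, mask-included index.
def pvIsNode (parents : List Int) (mask : Option (List Bool)) (x : Int) : Prop :=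
  0 ≤ x ∧ x < (parents.length : Int) ∧ pvIncl mask x = true

-- the dict key `i` receives: -1 for self-parent, else p
def pvKey (q : Int × Int) : Int := if q.2 == q.1 then -1 else q.2

lemma pvD0 : ∀ (l : List Int) (d : PySem.Dict Int (List Int)),
    (∀ c, d.getD c ([] : List Int) = []) → ∀ c,
    (l.foldl (fun d i => d.insert i []) d).getD c [] = [] := by
  intro l
  induction l with
  | nil => intro d h c; exact h c
  | cons i l ih =>
    intro d h c
    refine ih _ (fun c => ?_) c
    rw [PySem.Dict.getD_insert]
    split
    · rfl
    · exact h c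

lemma pvG_char (parents : List Int) (mask : Option (List Bool)) (c : Int) :
    pvG parents mask c =
      (((PySem.List.enumerate parents).filter (fun q => pvIncl mask q.1)).filter
        (fun q => pvKey q == c)).map (fun q => q.1) := by
  have h1 : pvChildren parents mask =
      ((PySem.List.enumerate parents).filter (fun q => pvIncl mask q.1)).foldl
        (fun d (q : Int × Int) =>
          if q.2 == q.1 then d.modify (-1) [] (· ++ [q.1]) else d.modify q.2 [] (· ++ [q.1]))
        ((PySem.List.pyRange (-1) (parents.length : Int) 1).foldl
          (fun d i => d.insert i []) PySem.Dict.empty) := by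
    unfold pvChildren
    rw [PySem.List.foldl_if_eq_foldl_filter]
  have h2 : ((PySem.List.enumerate parents).filter (fun q => pvIncl mask q.1)).foldl
        (fun d (q : Int × Int) =>
          if q.2 == q.1 then d.modify (-1) [] (· ++ [q.1]) else d.modify q.2 [] (· ++ [q.1]))
        ((PySem.List.pyRange (-1) (parents.length : Int) 1).foldl
          (fun d i => d.insert i []) PySem.Dict.empty) =
      (((PySem.List.enumerate parents).filter (fun q => pvIncl mask q.1)).map
          (fun q => (pvKey q, q.1))).foldl
        (fun d (r : Int × Int) => d.modify r.1 [] (· ++ [r.2]))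
        ((PySem.List.pyRange (-1) (parents.length : Int) 1).foldl
          (fun d i => d.insert i []) PySem.Dict.empty) := by
    rw [List.foldl_map]
    apply PySem.List.foldl_congr_mem
    intro acc q _
    unfold pvKey
    split <;> rfl
  unfold pvG
  rw [h1, h2, PySem.Dict.getD_foldl_modify_append]
  rw [pvD0 _ _ (fun c => by simp [PySem.Dict.getD_empty])]
  simp [List.filter_map, List.map_map, Function.comp_def]

lemma pvMemG (parents : List Int) (mask : Option (List Bool)) (c x : Int) :
    x ∈ pvG parents mask c ↔ pvIsNode parents mask x ∧ pvNp parents x = c := by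
  rw [pvG_char]
  simp only [List.mem_map, List.mem_filter, PySem.List.mem_enumerate_iff]
  constructor
  · rintro ⟨q, ⟨⟨⟨k, hk, rfl⟩, hincl⟩, hkey⟩, rfl⟩
    simp only [zero_add] at *
    have hget : PySem.List.pyGetD parents ((k : Nat) : Int) 0 = parents[k] := by
      rw [PySem.List.pyGetD_eq_getElem parents 0 (by positivity) (by exact_mod_cast hk)]
      simp
    refine ⟨⟨by positivity, by exact_mod_cast hk, hincl⟩, ?_⟩
    unfold pvNp
    rw [if_neg (by omega), hget]
    simpa [pvKey, beq_iff_eq] using hkey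
  · rintro ⟨⟨hx0, hxn, hincl⟩, hnp⟩
    have hk : x.toNat < parents.length := by omega
    refine ⟨(x, parents[x.toNat]), ⟨⟨⟨x.toNat, hk, by simp; omega⟩, hincl⟩, ?_⟩, rfl⟩
    have hget : PySem.List.pyGetD parents x 0 = parents[x.toNat] := by
      rw [PySem.List.pyGetD_eq_getElem parents 0 hx0 (by exact_mod_cast hxn)]
    unfold pvNp at hnp
    rw [if_neg (by omega), hget] at hnp
    simpa [pvKey, beq_iff_eq] using hnp

lemma pvNodupG (parents : List Int) (mask : Option (List Bool)) (c : Int) :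
    (pvG parents mask c).Nodup := by
  rw [pvG_char]
  have h := PySem.List.pairwise_lt_enumerate parents 0
  have hsub : ((PySem.List.enumerate parents).filter (fun q => pvIncl mask q.1)).filter
      (fun q => pvKey q == c) |>.Sublist (PySem.List.enumerate parents 0) :=
    (List.filter_sublist).trans (List.filter_sublist)
  have h2 := h.sublist hsub
  exact (List.pairwise_map.mpr h2).imp (fun hlt => ne_of_lt hlt)

lemma pvNp_neg_one (parents : List Int) (j : Nat) : (pvNp parents)^[j] (-1) = -1 :=
  Function.iterate_fixed (by unfold pvNp; norm_num) j

-- Comp f c: fuel f fully explores the subtree below c.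
def pvComp (parents : List Int) (mask : Option (List Bool)) : Nat → Int → Prop
  | 0, c => pvG parents mask c = []
  | f + 1, c => ∀ c' ∈ pvG parents mask c, pvComp parents mask f c'

-- the multiset of nodes a fully-fueled traversal below c prints
def pvVis (parents : List Int) (mask : Option (List Bool)) : Nat → Int → List Int
  | 0, c => [c]
  | f + 1, c => c :: (pvG parents mask c).flatMap (pvVis parents mask f)

lemma pvPeriodic (g : Int → Int) (c : Int) (r : Nat) (hr : 0 < r) (hc : g^[r] c = c) :
    ∀ j, g^[j] c = g^[j % r] c := by
  intro j
  induction j using Nat.strong_induction_on with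
  | _ j ih =>
    by_cases hj : j < r
    · rw [Nat.mod_eq_of_lt hj]
    · have hjr : j = (j - r) + r := by omega
      have h1 : g^[j] c = g^[j - r] c := by
        conv_lhs => rw [hjr, Function.iterate_add_apply, hc]
      rw [h1, ih (j - r) (by omega), ← Nat.mod_eq_sub_mod (by omega : j ≥ r)]

lemma pvNodupRangeInj (f : Nat → Int) (m a b : Nat) (h : ((List.range m).map f).Nodup)
    (ha : a < m) (hb : b < m) (hfe : f a = f b) : a = b := by
  have := List.Nodup.getElem_inj_iff (l := (List.range m).map f) h
    (hi := by simpa using ha) (hj := by simpa using hb)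
  simp_all

lemma pvCycMem (parents : List Int) (mask : Option (List Bool)) (z : Int) (r : Nat) (hr : 0 < r)
    (hc : (pvNp parents)^[r] z = z) (hj : ∀ j, pvIsNode parents mask ((pvNp parents)^[j] z)) :
    (pvNp parents)^[r - 1] z ∈ pvG parents mask z := by
  rw [pvMemG]
  refine ⟨hj (r - 1), ?_⟩
  have h1 : pvNp parents ((pvNp parents)^[r - 1] z) = (pvNp parents)^[(r - 1) + 1] z :=
    (Function.iterate_succ_apply' (pvNp parents) (r - 1) z).symm
  rw [h1, Nat.sub_add_cancel hr, hc]

lemma pvCyc (parents : List Int) (mask : Option (List Bool)) :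
    ∀ (f : Nat) (z : Int) (r : Nat), 0 < r → (pvNp parents)^[r] z = z →
      (∀ j, pvIsNode parents mask ((pvNp parents)^[j] z)) → pvComp parents mask f z → False := by
  intro f
  induction f with
  | zero =>
    intro z r hr hc hj hcomp
    have hw := pvCycMem parents mask z r hr hc hj
    simp only [pvComp] at hcomp
    simp [hcomp] at hw
  | succ f ih =>
    intro z r hr hc hj hcomp
    have hw := pvCycMem parents mask z r hr hc hj
    simp only [pvComp] at hcomp
    refine ih ((pvNp parents)^[r - 1] z) r hr ?_ ?_ (hcomp _ hw)
    · calc (pvNp parents)^[r] ((pvNp parents)^[r - 1] z)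
          = (pvNp parents)^[(r - 1) + r] z := by
            rw [← Function.iterate_add_apply, Nat.add_comm]
        _ = (pvNp parents)^[r - 1] ((pvNp parents)^[r] z) := Function.iterate_add_apply _ _ _ _
        _ = (pvNp parents)^[r - 1] z := by rw [hc]
    · intro j
      rw [← Function.iterate_add_apply]
      exact hj _

lemma pvNDLen (n : Nat) (l : List Int) (hnd : l.Nodup) (hb : ∀ x ∈ l, 0 ≤ x ∧ x < (n : Int)) :
    l.length ≤ n := by
  have h1 : (l.map Int.toNat).Nodup := by
    refine List.Nodup.map_on ?_ hnd
    intro x hx y hy hxy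
    have := (hb x hx).1; have := (hb y hy).1; omega
  have h2 : (l.map Int.toNat) ⊆ List.range n := by
    intro a ha
    simp only [List.mem_map] at ha
    obtain ⟨x, hx, rfl⟩ := ha
    have := hb x hx
    simp only [List.mem_range]; omega
  have := (List.subperm_of_subset h1 h2).length_le
  simpa using this

lemma pvChainExt (parents : List Int) (mask : Option (List Bool)) (c c' : Int) (m : Nat)
    (hc' : c' ∈ pvG parents mask c)
    (h1 : (pvNp parents)^[m + 1] c = -1)
    (h2 : ∀ j ≤ m, pvIsNode parents mask ((pvNp parents)^[j] c))
    (h3 : ((List.range (m + 1)).map (fun j => (pvNp parents)^[j] c)).Nodup) :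
    (pvNp parents)^[(m + 1) + 1] c' = -1 ∧
    (∀ j ≤ m + 1, pvIsNode parents mask ((pvNp parents)^[j] c')) ∧
    ((List.range ((m + 1) + 1)).map (fun j => (pvNp parents)^[j] c')).Nodup ∧
    m + 1 + 1 ≤ parents.length := by
  obtain ⟨hnode, hnp⟩ := (pvMemG parents mask c c').mp hc'
  have hshift : ∀ j, (pvNp parents)^[j + 1] c' = (pvNp parents)^[j] c := by
    intro j
    rw [Function.iterate_succ_apply, hnp]
  have e2 : (pvNp parents)^[(m + 1) + 1] c' = -1 := by rw [hshift (m + 1), h1]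
  have e3 : ∀ j ≤ m + 1, pvIsNode parents mask ((pvNp parents)^[j] c') := by
    intro j hj
    cases j with
    | zero => exact hnode
    | succ j => rw [hshift j]; exact h2 j (by omega)
  have echain : (List.range ((m + 1) + 1)).map (fun j => (pvNp parents)^[j] c') =
      c' :: (List.range (m + 1)).map (fun j => (pvNp parents)^[j] c) := by
    rw [List.range_succ_eq_map]
    simp only [List.map_cons, Function.iterate_zero_apply, List.map_map]
    congr 1
    refine List.map_congr_left (fun j _ => ?_)
    simpa using hshift j
  have e4 : ((List.range ((m + 1) + 1)).map (fun j => (pvNp parents)^[j] c')).Nodup := by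
    rw [echain, List.nodup_cons]
    refine ⟨?_, h3⟩
    intro hmem
    simp only [List.mem_map, List.mem_range] at hmem
    obtain ⟨j, hjlt, hje⟩ := hmem
    -- applying np to c' = np^[j] c gives np^[j+1] c = np c' = c = np^[0] c
    have hup : (pvNp parents)^[j + 1] c = (pvNp parents)^[0] c := by
      have : pvNp parents ((pvNp parents)^[j] c) = (pvNp parents)^[j + 1] c :=
        (Function.iterate_succ_apply' (pvNp parents) j c).symm
      rw [← this, hje, hnp, Function.iterate_zero_apply]
    by_cases hj1 : j + 1 < m + 1
    · have := pvNodupRangeInj _ (m + 1) (j + 1) 0 h3 hj1 (by omega) hup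
      omega
    · have hj2 : j + 1 = m + 1 := by omega
      rw [hj2] at hup
      rw [Function.iterate_zero_apply] at hup
      rw [h1] at hup
      have := (h2 0 (by omega)).1
      simp only [Function.iterate_zero_apply] at this
      omega
  refine ⟨e2, e3, e4, ?_⟩
  have hlen := pvNDLen parents.length _ e4 ?_
  · simpa using hlen
  · intro x hx
    simp only [List.mem_map, List.mem_range] at hx
    obtain ⟨j, hjlt, rfl⟩ := hx
    have := e3 j (by omega)
    exact ⟨this.1, this.2.1⟩

lemma pvComp_of_chain (parents : List Int) (mask : Option (List Bool)) :
    ∀ (f : Nat) (c : Int) (m : Nat),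
      (pvNp parents)^[m + 1] c = -1 →
      (∀ j ≤ m, pvIsNode parents mask ((pvNp parents)^[j] c)) →
      ((List.range (m + 1)).map (fun j => (pvNp parents)^[j] c)).Nodup →
      parents.length ≤ m + 1 + f →
      pvComp parents mask f c := by
  intro f
  induction f with
  | zero =>
    intro c m h1 h2 h3 hn
    simp only [pvComp]
    rcases hg : pvG parents mask c with _ | ⟨c', l⟩
    · rfl
    · exfalso
      have hc' : c' ∈ pvG parents mask c := by rw [hg]; exact List.mem_cons_self
      obtain ⟨_, _, _, hcount⟩ := pvChainExt parents mask c c' m hc' h1 h2 h3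
      omega
  | succ f ih =>
    intro c m h1 h2 h3 hn
    simp only [pvComp]
    intro c' hc'
    obtain ⟨e2, e3, e4, _⟩ := pvChainExt parents mask c c' m hc' h1 h2 h3
    exact ih c' (m + 1) e2 e3 e4 (by omega)

lemma pvCompRoot (parents : List Int) (mask : Option (List Bool)) (c : Int)
    (hc : c ∈ pvG parents mask (-1)) : pvComp parents mask parents.length c := by
  obtain ⟨hnode, hnp⟩ := (pvMemG parents mask (-1) c).mp hc
  refine pvComp_of_chain parents mask parents.length c 0 ?_ ?_ ?_ (by omega)
  · simpa using hnp
  · intro j hj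
    interval_cases j
    simpa using hnode
  · simp

-- two hits of the same parent at different heights on one ancestor chain give a cycle,
-- which contradicts full exploration (pvCyc)
lemma pvAncCyc (parents : List Int) (mask : Option (List Bool)) (x cpar : Int) (t₁ t₂ : Nat)
    (hlt : t₁ < t₂)
    (h1 : (pvNp parents)^[t₁] x = cpar) (h2 : (pvNp parents)^[t₂] x = cpar)
    (hj : ∀ j < t₂, pvIsNode parents mask ((pvNp parents)^[j] x))
    (f : Nat) (hcomp : pvComp parents mask f cpar) : False := by
  have hr : 0 < t₂ - t₁ := by omega
  have hcyc : (pvNp parents)^[t₂ - t₁] cpar = cpar := by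
    calc (pvNp parents)^[t₂ - t₁] cpar = (pvNp parents)^[t₂ - t₁] ((pvNp parents)^[t₁] x) := by
          rw [h1]
      _ = (pvNp parents)^[(t₂ - t₁) + t₁] x := (Function.iterate_add_apply _ _ _ _).symm
      _ = cpar := by rw [show (t₂ - t₁) + t₁ = t₂ by omega, h2]
  have hmembers : ∀ j, pvIsNode parents mask ((pvNp parents)^[j] cpar) := by
    intro j
    rw [pvPeriodic _ _ (t₂ - t₁) hr hcyc j]
    have hjr : j % (t₂ - t₁) < t₂ - t₁ := Nat.mod_lt _ hr
    have : (pvNp parents)^[j % (t₂ - t₁)] cpar = (pvNp parents)^[j % (t₂ - t₁) + t₁] x := by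
      rw [← h1, ← Function.iterate_add_apply]
    rw [this]
    exact hj _ (by omega)
  exact pvCyc parents mask f cpar (t₂ - t₁) hr hcyc hmembers hcomp

-- Nodup of the visited nodes, together with the ancestor-chain description of each visit.
lemma pvND (parents : List Int) (mask : Option (List Bool)) :
    ∀ (f : Nat) (c : Int), pvComp parents mask f c → pvIsNode parents mask c →
      (pvVis parents mask f c).Nodup ∧
      ∀ x ∈ pvVis parents mask f c, ∃ k, (pvNp parents)^[k] x = c ∧
        ∀ j ≤ k, pvIsNode parents mask ((pvNp parents)^[j] x) := by
  intro f
  induction f with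
  | zero =>
    intro c _ hnode
    refine ⟨by simp [pvVis], ?_⟩
    intro x hx
    simp only [pvVis, List.mem_singleton] at hx
    subst hx
    exact ⟨0, rfl, by intro j hj; interval_cases j; simpa using hnode⟩
  | succ f ih =>
    intro c hcomp hnode
    have hcomp' : ∀ c' ∈ pvG parents mask c, pvComp parents mask f c' := by
      simpa only [pvComp] using hcomp
    have hmm : ∀ c' ∈ pvG parents mask c, pvIsNode parents mask c' ∧ pvNp parents c' = c :=
      fun c' h => (pvMemG parents mask c c').mp h
    have hIH := fun c' (h : c' ∈ pvG parents mask c) => ih c' (hcomp' c' h) (hmm c' h).1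
    have hanc : ∀ x ∈ pvVis parents mask (f + 1) c, ∃ k, (pvNp parents)^[k] x = c ∧
        ∀ j ≤ k, pvIsNode parents mask ((pvNp parents)^[j] x) := by
      intro x hx
      simp only [pvVis, List.mem_cons, List.mem_flatMap] at hx
      rcases hx with rfl | ⟨c', hc', hx⟩
      · exact ⟨0, rfl, by intro j hj; interval_cases j; simpa using hnode⟩
      · obtain ⟨k, hk, hkb⟩ := (hIH c' hc').2 x hx
        have hk1 : (pvNp parents)^[k + 1] x = c := by
          rw [Function.iterate_succ_apply', hk, (hmm c' hc').2]
        refine ⟨k + 1, hk1, ?_⟩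
        intro j hj
        rcases Nat.lt_or_ge j (k + 1) with h | h
        · exact hkb j (by omega)
        · have : j = k + 1 := by omega
          subst this
          rw [hk1]
          exact hnode
    refine ⟨?_, hanc⟩
    simp only [pvVis, List.nodup_cons]
    constructor
    · intro hmem
      simp only [List.mem_flatMap] at hmem
      obtain ⟨c', hc', hx⟩ := hmem
      obtain ⟨k, hk, hkb⟩ := (hIH c' hc').2 c hx
      have hk1 : (pvNp parents)^[k + 1] c = c := by
        rw [Function.iterate_succ_apply', hk, (hmm c' hc').2]
      exact pvAncCyc parents mask c c 0 (k + 1) (by omega) rfl hk1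
        (fun j hj => hkb j (by omega)) (f + 1) hcomp
    · rw [List.nodup_flatMap]
      refine ⟨fun c' h => (hIH c' h).1, ?_⟩
      have hnd := pvNodupG parents mask c
      refine List.Pairwise.imp_of_mem ?_ hnd
      intro a b ha hb hab x hxa hxb
      obtain ⟨k₁, hka, hba⟩ := (hIH a ha).2 x hxa
      obtain ⟨k₂, hkb, hbb⟩ := (hIH b hb).2 x hxb
      have hstep : ∀ (u : Int) (k : Nat), (pvNp parents)^[k] x = u → u ∈ pvG parents mask c →
          (pvNp parents)^[k + 1] x = c := by
        intro u k hu humem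
        rw [Function.iterate_succ_apply', hu, (hmm u humem).2]
      have h1 := hstep a k₁ hka ha
      have h2 := hstep b k₂ hkb hb
      rcases lt_trichotomy k₁ k₂ with h | h | h
      · exact pvAncCyc parents mask x c (k₁ + 1) (k₂ + 1) (by omega) h1 h2
          (fun j hj => hbb j (by omega)) (f + 1) hcomp
      · exact hab (by rw [← hka, ← hkb, h])
      · exact pvAncCyc parents mask x c (k₂ + 1) (k₁ + 1) (by omega) h2 h1
          (fun j hj => hba j (by omega)) (f + 1) hcomp

lemma pvRootNodup (parents : List Int) (mask : Option (List Bool)) :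
    ((pvG parents mask (-1)).flatMap (pvVis parents mask parents.length)).Nodup := by
  have hmm : ∀ c' ∈ pvG parents mask (-1), pvIsNode parents mask c' ∧ pvNp parents c' = -1 :=
    fun c' h => (pvMemG parents mask (-1) c').mp h
  have hIH := fun c' (h : c' ∈ pvG parents mask (-1)) =>
    pvND parents mask parents.length c' (pvCompRoot parents mask c' h) (hmm c' h).1
  rw [List.nodup_flatMap]
  refine ⟨fun c' h => (hIH c' h).1, ?_⟩
  refine List.Pairwise.imp_of_mem ?_ (pvNodupG parents mask (-1))
  intro a b ha hb hab x hxa hxb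
  obtain ⟨k₁, hka, hba⟩ := (hIH a ha).2 x hxa
  obtain ⟨k₂, hkb, hbb⟩ := (hIH b hb).2 x hxb
  have hstep : ∀ (u : Int) (k : Nat), (pvNp parents)^[k] x = u → u ∈ pvG parents mask (-1) →
      (pvNp parents)^[k + 1] x = -1 := by
    intro u k hu humem
    rw [Function.iterate_succ_apply', hu, (hmm u humem).2]
  have habs : ∀ (k₁ k₂ : Nat) (a b : Int), k₁ < k₂ → (pvNp parents)^[k₁ + 1] x = -1 →
      (pvNp parents)^[k₂] x = b → pvIsNode parents mask b → False := by
    intro k₁ k₂ a b hlt h1 h2 hbn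
    have : (pvNp parents)^[k₂] x = -1 := by
      have : (pvNp parents)^[k₂] x = (pvNp parents)^[k₂ - (k₁ + 1)] ((pvNp parents)^[k₁ + 1] x) := by
        rw [← Function.iterate_add_apply, show k₂ - (k₁ + 1) + (k₁ + 1) = k₂ by omega]
      rw [this, h1, pvNp_neg_one]
    rw [this] at h2
    have := hbn.1
    omega
  rcases lt_trichotomy k₁ k₂ with h | h | h
  · exact habs k₁ k₂ a b h (hstep a k₁ hka ha) hkb (hmm b hb).1
  · exact hab (by rw [← hka, ← hkb, h])
  · exact habs k₂ k₁ b a h (hstep b k₂ hkb hb) hka (hmm a ha).1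

lemma pvRootLen (parents : List Int) (mask : Option (List Bool)) :
    ((pvG parents mask (-1)).flatMap (pvVis parents mask parents.length)).length ≤ parents.length := by
  refine pvNDLen parents.length _ (pvRootNodup parents mask) ?_
  intro x hx
  simp only [List.mem_flatMap] at hx
  obtain ⟨c', hc', hx⟩ := hx
  have hmm := (pvMemG parents mask (-1) c').mp hc'
  obtain ⟨k, hk, hkb⟩ := (pvND parents mask parents.length c'
    (pvCompRoot parents mask c' hc') hmm.1).2 x hx
  have := hkb 0 (by omega)
  simp only [Function.iterate_zero_apply] at this
  exact ⟨this.1, this.2.1⟩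

lemma pvFormatA_flat (parents : List Int) (mask : Option (List Bool)) (texts : List String)
    (mtl : Int) (f : Nat) (node : Int) (indent : Nat) :
    pvFormatA (pvChildren parents mask) texts mtl (f + 1) node indent =
      (pvG parents mask node).flatMap (fun child =>
        pvLine texts mtl child indent ::
          pvFormatA (pvChildren parents mask) texts mtl f child (indent + 1)) := by
  show ((pvChildren parents mask).getD node []).foldl _ [] = _
  rw [show (pvChildren parents mask).getD node [] = pvG parents mask node from rfl]
  refine Eq.trans (PySem.List.foldl_congr_mem _ _
      (fun (acc : List String) child => acc ++
        (pvLine texts mtl child indent ::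
          pvFormatA (pvChildren parents mask) texts mtl f child (indent + 1))) _ ?_) ?_
  · intro acc x _
    simp
  · rw [PySem.List.foldl_append_eq_flatMap]
    simp

lemma pvLenA (parents : List Int) (mask : Option (List Bool)) (texts : List String) (mtl : Int) :
    ∀ (f : Nat) (c : Int) (d : Nat),
      (pvFormatA (pvChildren parents mask) texts mtl f c d).length + 1 =
        (pvVis parents mask f c).length := by
  intro f
  induction f with
  | zero => intro c d; simp [pvFormatA, pvVis]
  | succ f ih =>
    intro c d
    rw [pvFormatA_flat]
    simp only [pvVis, List.length_cons, List.length_flatMap]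
    congr 1
    refine congrArg List.sum (List.map_congr_left ?_)
    intro c' _
    simpa using ih c' (d + 1)

lemma pvLoopB_nil (children : PySem.Dict Int (List Int)) (texts : List String) (mtl : Int)
    (f : Nat) (acc : List String) : pvLoopB children texts mtl f [] acc = acc := by
  cases f <;> rfl

lemma pvLoopChunk (parents : List Int) (mask : Option (List Bool)) (texts : List String) (mtl : Int) :
    ∀ (f : Nat) (cs : List Int) (d : Nat) (rest : List (Int × Nat)) (acc : List String) (fL : Nat),
      (∀ c ∈ cs, pvComp parents mask f c) →
      pvLoopB (pvChildren parents mask) texts mtl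
          ((cs.flatMap (fun c => pvLine texts mtl c d ::
              pvFormatA (pvChildren parents mask) texts mtl f c (d + 1))).length + fL)
          (cs.map (fun c => (c, d)) ++ rest) acc =
        pvLoopB (pvChildren parents mask) texts mtl fL rest
          (acc ++ cs.flatMap (fun c => pvLine texts mtl c d ::
              pvFormatA (pvChildren parents mask) texts mtl f c (d + 1))) := by
  intro f
  induction f with
  | zero =>
    intro cs
    induction cs with
    | nil => intro d rest acc fL _; simp
    | cons c cs' ihcs =>
      intro d rest acc fL hcomp
      have hg : pvG parents mask c = [] := by
        have := hcomp c List.mem_cons_self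
        simpa only [pvComp] using this
      simp only [List.flatMap_cons, List.map_cons, List.cons_append]
      rw [show (pvFormatA (pvChildren parents mask) texts mtl 0 c (d + 1) : List String) = []
        from rfl]
      simp only [List.nil_append]
      have hfuel : (pvLine texts mtl c d ::
          cs'.flatMap (fun c => pvLine texts mtl c d ::
            pvFormatA (pvChildren parents mask) texts mtl 0 c (d + 1))).length + fL =
          ((cs'.flatMap (fun c => pvLine texts mtl c d ::
            pvFormatA (pvChildren parents mask) texts mtl 0 c (d + 1))).length + fL) + 1 := by
        simp only [List.length_cons]
        omega
      rw [hfuel]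
      simp only [pvLoopB]
      rw [show (pvChildren parents mask).getD c [] = pvG parents mask c from rfl, hg]
      simp only [List.map_nil, List.nil_append]
      rw [ihcs d rest (acc ++ [pvLine texts mtl c d]) fL
        (fun x hx => hcomp x (List.mem_cons_of_mem _ hx))]
      simp

  | succ f ihf =>
    intro cs
    induction cs with
    | nil => intro d rest acc fL _; simp
    | cons c cs' ihcs =>
      intro d rest acc fL hcomp
      have hcompc := hcomp c List.mem_cons_self
      have hcompc' : ∀ c' ∈ pvG parents mask c, pvComp parents mask f c' := by
        simpa only [pvComp] using hcompc
      simp only [List.flatMap_cons, List.map_cons, List.cons_append]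
      have hfuel : (pvLine texts mtl c d ::
          (pvFormatA (pvChildren parents mask) texts mtl (f + 1) c (d + 1) ++
          cs'.flatMap (fun c => pvLine texts mtl c d ::
            pvFormatA (pvChildren parents mask) texts mtl (f + 1) c (d + 1)))).length + fL =
          ((pvFormatA (pvChildren parents mask) texts mtl (f + 1) c (d + 1)).length +
            ((cs'.flatMap (fun c => pvLine texts mtl c d ::
              pvFormatA (pvChildren parents mask) texts mtl (f + 1) c (d + 1))).length + fL)) + 1 := by
        simp only [List.length_append, List.length_cons]
        omega
      rw [hfuel]
      simp only [pvLoopB]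
      rw [show (pvChildren parents mask).getD c [] = pvG parents mask c from rfl]
      rw [pvFormatA_flat parents mask texts mtl f c (d + 1)]
      rw [ihf (pvG parents mask c) (d + 1) (cs'.map (fun c => (c, d)) ++ rest)
        (acc ++ [pvLine texts mtl c d])
        ((cs'.flatMap (fun c => pvLine texts mtl c d ::
          pvFormatA (pvChildren parents mask) texts mtl (f + 1) c (d + 1))).length + fL)
        hcompc']
      rw [ihcs d rest
        (acc ++ [pvLine texts mtl c d] ++ (pvG parents mask c).flatMap (fun child =>
          pvLine texts mtl child (d + 1) ::
            pvFormatA (pvChildren parents mask) texts mtl f child (d + 1 + 1))) fL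
        (fun x hx => hcomp x (List.mem_cons_of_mem _ hx))]
      rw [← pvFormatA_flat parents mask texts mtl f c (d + 1)]
      simp

-- ===== VERDICT (by name: the statement is the Claim_ definition above) =====
theorem format_tree_from_parents_spec : Claim_equal_format_tree_from_parents := by
  unfold Claim_equal_format_tree_from_parents
  intro parents texts mask max_text_len _ _
  unfold Spec_format_tree_from_parents
  unfold format_tree_from_parents format_tree_from_parents_alt
  rw [pvFormatA_flat parents mask texts max_text_len parents.length (-1) 0]
  have hT : ((pvG parents mask (-1)).flatMap (fun child =>
      pvLine texts max_text_len child 0 ::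
        pvFormatA (pvChildren parents mask) texts max_text_len parents.length child (0 + 1))).length
      ≤ parents.length := by
    have h1 : ((pvG parents mask (-1)).flatMap (fun child =>
        pvLine texts max_text_len child 0 ::
          pvFormatA (pvChildren parents mask) texts max_text_len parents.length child (0 + 1))).length =
        ((pvG parents mask (-1)).flatMap (pvVis parents mask parents.length)).length := by
      simp only [List.length_flatMap]
      refine congrArg List.sum (List.map_congr_left ?_)
      intro c' _
      simp only [List.length_cons]
      exact pvLenA parents mask texts max_text_len parents.length c' (0 + 1)
    rw [h1]
    exact pvRootLen parents mask
  rw [show ((pvChildren parents mask).getD (-1) []).map (fun c => (c, 0)) =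
    (pvG parents mask (-1)).map (fun c => (c, 0)) ++ ([] : List (Int × Nat)) from by simp [pvG]]
  rw [show parents.length + 1 = ((pvG parents mask (-1)).flatMap (fun child =>
      pvLine texts max_text_len child 0 ::
        pvFormatA (pvChildren parents mask) texts max_text_len parents.length child (0 + 1))).length +
      (parents.length + 1 - ((pvG parents mask (-1)).flatMap (fun child =>
      pvLine texts max_text_len child 0 ::
        pvFormatA (pvChildren parents mask) texts max_text_len parents.length child (0 + 1))).length)
    from by omega]
  rw [pvLoopChunk parents mask texts max_text_len parents.length (pvG parents mask (-1)) 0 [] []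
    _ (fun c hc => pvCompRoot parents mask c hc)]
  rw [pvLoopB_nil]
  simp
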